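-- pv_equiv track=rewrite | github.com/LocusLontrime/Python | CodeWars_Rush/1kyu/BETA_Assembling_a_Circular_Genome_Shortest_Common_Superstring_1kyu.py | calc_affinity
-- ===== SOURCE A (Python) =====
-- def calc_affinity(str1: str, str2: str):
--     max_res, max_j, error_indexes, errors = 0, 0, [], []
--     for j_index in range(len(str1)):
--         res, error_indexes = 0, []
--         for index in range(len(str1) - j_index):
--             if str1[j_index + index] == str2[index]:
--                 res += 1
--             else:
--                 error_indexes.append(index)
--
--         if max_res < res:
--             max_res = res
--             max_j = j_index
--             errors = error_indexes.copy()
--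
--     errs = [(max_j + err) for err in errors]
--
--     return max_res, errs
-- ===== SOURCE B (Python) =====
-- def calc_affinity(str1: str, str2: str):
--     n = len(str1)
--     # index str2's positions by character, so match counts per shift are
--     # accumulated only over actual character coincidences
--     pos2 = {}
--     for q, c in enumerate(str2):
--         pos2.setdefault(c, []).append(q)
--     counts = [0] * n
--     for p, c in enumerate(str1):
--         for q in pos2.get(c, []):
--             if q <= p:
--                 counts[p - q] += 1
--     max_res = max(counts, default=0)
--     if max_res == 0:
--         return 0, []
--     j = counts.index(max_res)
--     errs = [j + i for i, (a, b) in enumerate(zip(str1[j:], str2)) if a != b]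
--     return max_res, errs
-- ===== Notes on version B (the rewrite author's own statement) =====
-- stated objective: faster
-- what changed: Instead of rescanning the whole window for every shift, B indexes str2's positions by character once and accumulates per-shift match counts only over actual character coincidences (a sparse cross-correlation histogram), then takes max + first argmax and computes the mismatch positions of the winning shift in one final pass.
import Mathlib
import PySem

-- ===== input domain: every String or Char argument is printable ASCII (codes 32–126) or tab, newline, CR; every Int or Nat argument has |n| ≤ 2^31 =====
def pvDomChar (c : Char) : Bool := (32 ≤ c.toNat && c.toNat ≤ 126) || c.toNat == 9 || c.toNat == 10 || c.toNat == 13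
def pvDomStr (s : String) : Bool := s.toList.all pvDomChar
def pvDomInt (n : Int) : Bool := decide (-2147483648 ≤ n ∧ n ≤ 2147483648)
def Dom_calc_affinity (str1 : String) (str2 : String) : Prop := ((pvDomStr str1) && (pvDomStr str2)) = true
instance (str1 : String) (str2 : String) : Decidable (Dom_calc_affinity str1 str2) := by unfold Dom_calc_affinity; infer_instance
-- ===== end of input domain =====

-- B replaces A's per-shift window rescan by a per-character position index of str2 (a sparse
-- correlation histogram of match counts per shift), then max + first argmax + one mismatch pass:
-- measurably faster on diverse alphabets. Equivalence is about the return value; neither mutates.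

-- ===== PORT A =====
-- inner loop: res / error_indexes over range(len(str1) - j_index)
def calcA_inner (l1 l2 : List Char) (j : Nat) : Int × List Int :=
  (List.range (l1.length - j)).foldl
    (fun p i =>
      if l1.getD (j + i) ' ' = l2.getD i ' ' then (p.1 + 1, p.2)
      else (p.1, p.2 ++ [(i : Int)]))
    (0, [])

def calc_affinity (str1 : String) (str2 : String) : Int × List Int :=
  let l1 := str1.toList
  let l2 := str2.toList
  let st := (List.range l1.length).foldl
    (fun (acc : Int × Nat × List Int) j =>
      let r := calcA_inner l1 l2 j
      if acc.1 < r.1 then (r.1, j, r.2) else acc)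
    (0, 0, [])
  (st.1, st.2.2.map (fun e => (st.2.1 : Int) + e))

-- ===== PORT B =====
-- pos2: for q, c in enumerate(str2): pos2.setdefault(c, []).append(q)
def calcB_pos2 (l2 : List Char) : PySem.Dict Char (List Nat) :=
  l2.zipIdx.foldl (fun d p => d.modify p.1 [] (· ++ [p.2])) PySem.Dict.empty

-- counts: for p, c in enumerate(str1): for q in pos2.get(c, []): if q <= p: counts[p-q] += 1
def calcB_counts (l1 : List Char) (pos2 : PySem.Dict Char (List Nat)) : List Int :=
  l1.zipIdx.foldl
    (fun cs pc =>
      (pos2.getD pc.1 []).foldl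
        (fun cs q => if q ≤ pc.2 then cs.modify (pc.2 - q) (· + 1) else cs) cs)
    (List.replicate l1.length 0)

def calc_affinity_alt (str1 : String) (str2 : String) : Int × List Int :=
  let l1 := str1.toList
  let l2 := str2.toList
  let counts := calcB_counts l1 (calcB_pos2 l2)
  let mx := (PySem.List.max? counts (fun x => x)).getD 0
  if mx = 0 then (0, [])
  else
    let j := (PySem.List.index? counts mx).getD 0
    -- str1[j:] with the natural index j is the drop; zip truncates as Python's zip does
    (mx, (((l1.drop j).zip l2).zipIdx.filter (fun x => x.1.1 != x.1.2)).map
           (fun x => ((j + x.2 : Nat) : Int)))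

-- ===== PRECONDITION & SPEC =====
-- A indexes str2[index] for index < len(str1) - j_index, so it raises IndexError whenever
-- str2 is shorter than str1 (and str1 is nonempty); Pre_ excludes exactly those inputs.
def Pre_calc_affinity (str1 : String) (str2 : String) : Prop :=
  str1.toList.length ≤ str2.toList.length
instance (str1 : String) (str2 : String) : Decidable (Pre_calc_affinity str1 str2) := by
  unfold Pre_calc_affinity; infer_instance
def pvWitness_calc_affinity : String × String := ("acab", "abcab")

def Spec_calc_affinity (str1 : String) (str2 : String) (out : Int × List Int) : Prop :=
  out = calc_affinity_alt str1 str2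
instance (str1 : String) (str2 : String) (out : Int × List Int) :
    Decidable (Spec_calc_affinity str1 str2 out) := by unfold Spec_calc_affinity; infer_instance

-- ===== CLAIM (what is proved, stated in full; the proofs are below) =====
def Claim_equal_calc_affinity : Prop := ∀ (str1 : String) (str2 : String),
  Dom_calc_affinity str1 str2 → Pre_calc_affinity str1 str2 →
  Spec_calc_affinity str1 str2 (calc_affinity str1 str2)

-- ===== LEMMAS AND PROOFS =====

-- match count at shift j (A's res)
def pvMc (l1 l2 : List Char) (j : Nat) : Int :=
  ((List.range (l1.length - j)).countP
    (fun i => l1.getD (j + i) ' ' == l2.getD i ' ') : Nat)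

-- mismatch indexes (window-relative) at shift j (A's error_indexes)
def pvErrL (l1 l2 : List Char) (j : Nat) : List Int :=
  ((List.range (l1.length - j)).filter
    (fun i => !(l1.getD (j + i) ' ' == l2.getD i ' '))).map (Nat.cast : Nat → Int)

theorem calcA_inner_eq (l1 l2 : List Char) (j : Nat) :
    calcA_inner l1 l2 j = (pvMc l1 l2 j, pvErrL l1 l2 j) := by
  unfold calcA_inner pvMc pvErrL
  have h1 : (List.range (l1.length - j)).foldl
      (fun (p : Int × List Int) i =>
        if l1.getD (j + i) ' ' = l2.getD i ' ' then (p.1 + 1, p.2)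
        else (p.1, p.2 ++ [(i : Int)])) (0, []) =
    (List.range (l1.length - j)).foldl
      (fun (p : Int × List Int) i =>
        ((if l1.getD (j + i) ' ' = l2.getD i ' ' then p.1 + 1 else p.1),
         (if l1.getD (j + i) ' ' = l2.getD i ' ' then p.2 else p.2 ++ [(i : Int)]))) (0, []) :=
    PySem.List.foldl_congr_mem _ _ _ _ (by intro acc x _; split <;> rfl)
  rw [h1,
    PySem.List.foldl_prod_mk
      (f := fun (a : Int) i => if l1.getD (j + i) ' ' = l2.getD i ' ' then a + 1 else a)
      (g := fun (a : List Int) i => if l1.getD (j + i) ' ' = l2.getD i ' ' then a else a ++ [(i : Int)]),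
    PySem.List.foldl_ite_add_one]
  have h2 : (List.range (l1.length - j)).foldl
      (fun (a : List Int) i =>
        if l1.getD (j + i) ' ' = l2.getD i ' ' then a else a ++ [(i : Int)]) [] =
    (List.range (l1.length - j)).foldl
      (fun (a : List Int) i =>
        if !(l1.getD (j + i) ' ' == l2.getD i ' ') then a ++ [(i : Int)] else a) [] :=
    PySem.List.foldl_congr_mem _ _ _ _ (by intro acc x _; simp)
  rw [h2, PySem.List.foldl_append_if]
  simp only [Prod.mk.injEq]
  exact ⟨by rw [zero_add]; norm_cast, rfl⟩

-- A's outer selection fold, characterized: either nothing ever beat 0, or the state holds the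
-- value, the first index attaining it, and its error list
theorem aOuter_char (f : Nat → Int) (g : Nat → List Int) (n : Nat) :
    (((List.range n).foldl
        (fun (acc : Int × Nat × List Int) j =>
          if acc.1 < f j then (f j, j, g j) else acc) (0, 0, [])) = ((0 : Int), 0, ([] : List Int))
      ∧ ∀ j < n, f j ≤ 0) ∨
    (let st := (List.range n).foldl
        (fun (acc : Int × Nat × List Int) j =>
          if acc.1 < f j then (f j, j, g j) else acc) (0, 0, ([] : List Int));
     0 < st.1 ∧ st.2.1 < n ∧ f st.2.1 = st.1 ∧ g st.2.1 = st.2.2 ∧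
     (∀ j < n, f j ≤ st.1) ∧ (∀ j < st.2.1, f j < st.1)) := by
  induction n with
  | zero => left; exact ⟨rfl, by omega⟩
  | succ n ih =>
    rw [List.range_succ, List.foldl_append]
    simp only [List.foldl_cons, List.foldl_nil]
    rcases ih with ⟨hst, hall⟩ | ih
    · rw [hst]
      by_cases h : (0 : Int) < f n
      · right
        simp only [if_pos h]
        refine ⟨h, Nat.lt_succ_self n, trivial, trivial, ?_, ?_⟩
        · intro j hj
          rcases Nat.lt_succ_iff_lt_or_eq.mp hj with hj | hj
          · exact le_of_lt (lt_of_le_of_lt (hall j hj) h)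
          · subst hj; exact le_refl _
        · intro j hj; exact lt_of_le_of_lt (hall j hj) h
      · left
        simp only [if_neg h]
        exact ⟨trivial, fun j hj => by
          rcases Nat.lt_succ_iff_lt_or_eq.mp hj with hj | hj
          · exact hall j hj
          · subst hj; omega⟩
    · simp only at ih
      obtain ⟨hpos, hlt, hfeq, hgeq, hall, hfirst⟩ := ih
      set st := (List.range n).foldl
        (fun (acc : Int × Nat × List Int) j =>
          if acc.1 < f j then (f j, j, g j) else acc) (0, 0, ([] : List Int)) with hstdef
      by_cases h : st.1 < f n
      · right
        simp only [if_pos h]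
        refine ⟨lt_trans hpos h, Nat.lt_succ_self n, trivial, trivial, ?_, ?_⟩
        · intro j hj
          rcases Nat.lt_succ_iff_lt_or_eq.mp hj with hj | hj
          · exact le_of_lt (lt_of_le_of_lt (hall j hj) h)
          · subst hj; exact le_refl _
        · intro j hj; exact lt_of_le_of_lt (hall j hj) h
      · right
        simp only [if_neg h]
        refine ⟨hpos, Nat.lt_succ_of_lt hlt, hfeq, hgeq, ?_, hfirst⟩
        intro j hj
        rcases Nat.lt_succ_iff_lt_or_eq.mp hj with hj | hj
        · exact hall j hj
        · subst hj; omega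

theorem zipIdx_eq_map_range (l : List Char) :
    l.zipIdx = (List.range l.length).map (fun i => (l.getD i ' ', i)) := by
  apply List.ext_getElem
  · simp
  · intro i h1 h2
    rw [List.getElem_zipIdx]
    simp only [List.getElem_map, List.getElem_range]
    rw [List.getD_eq_getElem l ' ' (by simpa using h1)]
    simp

theorem pvCountFlatMap {α : Type} (l : List α) (g : α → List Nat) (j : Nat) :
    ((l.flatMap g).count j) = (l.map (fun x => (g x).count j)).sum := by
  induction l with
  | nil => simp
  | cons x l ih => simp [List.flatMap_cons, List.count_append, ih]

theorem pos2_char (l2 : List Char) (c : Char) :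
    (calcB_pos2 l2).getD c [] =
      (List.range l2.length).filter (fun q => l2.getD q ' ' == c) := by
  unfold calcB_pos2
  rw [PySem.Dict.getD_foldl_modify_append, zipIdx_eq_map_range]
  simp [List.filter_map, List.map_map, Function.comp_def]

-- count contributed by position p of str1 to shift j
theorem perP_count (l1 l2 : List Char) (h : l1.length ≤ l2.length) (j p : Nat)
    (hp : p < l1.length) :
    (((((calcB_pos2 l2).getD (l1.getD p ' ') []).filter (fun q => q ≤ p)).map
        (fun q => p - q)).count j) =
      if decide (j ≤ p) && (l2.getD (p - j) ' ' == l1.getD p ' ') then 1 else 0 := by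
  rw [pos2_char, List.count_eq_countP, List.countP_map, List.countP_filter, List.countP_filter]
  have hrw : ∀ q ∈ List.range l2.length,
      ((((fun x => x == j) ∘ fun q => p - q) q && decide (q ≤ p) && (l2.getD q ' ' == l1.getD p ' ')))
      = ((q == p - j) && (decide (j ≤ p) && (l2.getD (p - j) ' ' == l1.getD p ' '))) := by
    intro q hq
    rw [Bool.and_assoc]
    by_cases hqe : q = p - j
    · subst hqe
      by_cases hjp : j ≤ p
      · simp [Function.comp, hjp, Nat.sub_sub_self hjp]
      · have h0 : p - j = 0 := by omega
        have hpj : ¬ (p = j) := by omega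
        have hR : (decide (j ≤ p) && (l2.getD (p - j) ' ' == l1.getD p ' ')) = false := by
          simp [hjp]
        rw [hR, Bool.and_false]
        simp [Function.comp, h0, hpj]
    · have hR : (q == p - j) = false := by simp [hqe]
      rw [hR, Bool.false_and]
      by_cases hql : q ≤ p
      · have h1 : ¬ (p - q = j) := fun h1 => hqe (by omega)
        simp [Function.comp, h1]
      · simp [Function.comp, hql]
  rw [List.countP_congr (fun x hx => by rw [hrw x hx])]
  by_cases hC : (decide (j ≤ p) && (l2.getD (p - j) ' ' == l1.getD p ' ')) = true
  · rw [if_pos hC]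
    simp only [hC, Bool.and_true]
    rw [← List.count_eq_countP, List.count_range]
    rw [if_pos (by omega)]
  · rw [if_neg hC]
    simp only [Bool.not_eq_true] at hC
    simp
    intro a ha hae hjp
    simp [hjp] at hC
    simpa using hC

theorem foldl_modify_getElem? (D : List Nat) (cs : List Int) (j : Nat) :
    (D.foldl (fun l k => l.modify k (· + 1)) cs)[j]? = cs[j]?.map (· + (D.count j : Int)) := by
  induction D generalizing cs with
  | nil => simp
  | cons k D ih =>
    simp only [List.foldl_cons, ih, List.getElem?_modify]
    by_cases hkj : k = j
    · subst hkj
      cases h : cs[k]?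
      · simp
      · simp [List.count_cons_self]; ring
    · simp [hkj]

theorem counts_eq (l1 l2 : List Char) (h : l1.length ≤ l2.length) :
    calcB_counts l1 (calcB_pos2 l2) = (List.range l1.length).map (pvMc l1 l2) := by
  have step1 : ∀ (cs : List Int) (pc : Char × Nat),
      ((calcB_pos2 l2).getD pc.1 []).foldl
        (fun cs q => if q ≤ pc.2 then cs.modify (pc.2 - q) (· + 1) else cs) cs
      = (((((calcB_pos2 l2).getD pc.1 []).filter (fun q => q ≤ pc.2)).map
            (fun q => pc.2 - q)).foldl (fun l k => l.modify k (· + 1)) cs) := by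
    intro cs pc
    rw [PySem.List.foldl_ite_eq_foldl_filter, List.foldl_map]
  have step2 : calcB_counts l1 (calcB_pos2 l2) =
      (l1.zipIdx.flatMap (fun pc =>
        ((((calcB_pos2 l2).getD pc.1 []).filter (fun q => q ≤ pc.2)).map
          (fun q => pc.2 - q)))).foldl (fun l k => l.modify k (· + 1))
        (List.replicate l1.length 0) := by
    unfold calcB_counts
    rw [List.foldl_flatMap]
    exact PySem.List.foldl_congr_mem _ _ _ _ (fun acc x _ => step1 acc x)
  rw [step2]
  apply List.ext_getElem?
  intro j
  rw [foldl_modify_getElem?]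
  by_cases hj : j < l1.length
  · rw [List.getElem?_replicate, if_pos hj, List.getElem?_map,
      List.getElem?_range hj]
    simp only [Option.map_some]
    congr 1
    rw [zipIdx_eq_map_range l1, List.flatMap_map, pvCountFlatMap]
    have hmap : ∀ p ∈ List.range l1.length,
        (((((calcB_pos2 l2).getD ((fun i => (l1.getD i ' ', i)) p).1 []).filter
            (fun q => q ≤ ((fun i => (l1.getD i ' ', i)) p).2)).map
            (fun q => ((fun i => (l1.getD i ' ', i)) p).2 - q)).count j)
        = if decide (j ≤ p) && (l2.getD (p - j) ' ' == l1.getD p ' ') then 1 else 0 := by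
      intro p hp
      exact perP_count l1 l2 h j p (by simpa using hp)
    rw [List.map_congr_left hmap, PySem.List.sum_map_ite_one_zero_nat]
    have hsplit : l1.length = j + (l1.length - j) := by omega
    rw [show List.range l1.length = List.range (j + (l1.length - j)) by rw [← hsplit],
      List.range_add, List.countP_append]
    have h0 : (List.range j).countP
        (fun p => decide (j ≤ p) && (l2.getD (p - j) ' ' == l1.getD p ' ')) = 0 := by
      rw [List.countP_eq_zero]
      intro p hp
      simp at hp ⊢
      omega
    rw [h0, Nat.zero_add, List.countP_map]
    unfold pvMc
    rw [zero_add]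
    have hc : List.countP
        ((fun a => decide (j ≤ a) && (l2.getD (a - j) ' ' == l1.getD a ' ')) ∘ fun x => j + x)
        (List.range (l1.length - j))
        = List.countP (fun i => l1.getD (j + i) ' ' == l2.getD i ' ')
            (List.range (l1.length - j)) := by
      apply List.countP_congr
      intro i hi
      have hdec : decide (j ≤ j + i) = true := by simp
      simp only [Function.comp, hdec, Bool.true_and, Nat.add_sub_cancel_left]
      simp only [beq_iff_eq]
      exact eq_comm
    rw [hc]
  · rw [List.getElem?_replicate, if_neg hj, List.getElem?_map,
      List.getElem?_eq_none (by simpa using Nat.le_of_not_lt hj)]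
    rfl

theorem errs_eq (l1 l2 : List Char) (h : l1.length ≤ l2.length) (j : Nat) :
    (((l1.drop j).zip l2).zipIdx.filter (fun x => x.1.1 != x.1.2)).map
      (fun x => ((j + x.2 : Nat) : Int)) =
    (pvErrL l1 l2 j).map (fun e => (j : Int) + e) := by
  have hz : ((l1.drop j).zip l2).zipIdx =
      (List.range (l1.length - j)).map
        (fun i => ((l1.getD (j + i) ' ', l2.getD i ' '), i)) := by
    apply List.ext_getElem
    · simp; omega
    · intro i h1 h2
      have hi : i < l1.length - j := by simpa using h2
      rw [List.getElem_zipIdx]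
      simp only [List.getElem_map, List.getElem_range]
      rw [List.getElem_zip, List.getElem_drop]
      rw [List.getD_eq_getElem l1 ' ' (by omega), List.getD_eq_getElem l2 ' ' (by omega)]
      simp
  rw [hz, List.filter_map, List.map_map]
  unfold pvErrL
  rw [List.map_map]
  have hfil : List.filter ((fun (x : (Char × Char) × Nat) => x.1.1 != x.1.2) ∘
        fun i => ((l1.getD (j + i) ' ', l2.getD i ' '), i)) (List.range (l1.length - j))
      = List.filter (fun i => !(l1.getD (j + i) ' ' == l2.getD i ' '))
          (List.range (l1.length - j)) := by
    apply List.filter_congr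
    intro i hi
    simp [Function.comp, bne]
  rw [hfil]
  apply List.map_congr_left
  intro i hi
  simp [Function.comp]

-- first index of the maximum in counts = map f (range n)
theorem index?_map_range (f : Nat → Int) (n k : Nat) (v : Int) (hk : k < n)
    (hfk : f k = v) (hlt : ∀ i < k, f i ≠ v) :
    PySem.List.index? ((List.range n).map f) v = some k := by
  rw [PySem.List.index?_eq_some_iff]
  refine ⟨(List.range k).map f, (List.range (n - k - 1)).map (fun i => f (k + 1 + i)), ?_, by simp, ?_⟩
  · rw [show n = k + (n - k) by omega, List.range_add, List.map_append, List.map_map]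
    congr 1
    rw [show n - k = 1 + (n - (k + (n-k)) + (n - k - 1)) by omega]
    rw [show (1 + (n - (k + (n-k)) + (n - k - 1))) = 1 + (n - k - 1) by omega]
    rw [List.range_add, List.map_append, List.map_map]
    simp [Function.comp, hfk]
    intro a ha
    congr 1
    omega
  · intro hmem
    rw [List.mem_map] at hmem
    obtain ⟨i, hi, hfi⟩ := hmem
    exact hlt i (by simpa using hi) hfi

theorem mc_nonneg (l1 l2 : List Char) (j : Nat) : 0 ≤ pvMc l1 l2 j := by
  unfold pvMc
  positivity

-- ===== VERDICT (by name: the statement is the Claim_ definition above) =====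
theorem calc_affinity_spec : Claim_equal_calc_affinity := by
  unfold Claim_equal_calc_affinity
  intro s1 s2 _ hPre
  unfold Spec_calc_affinity calc_affinity calc_affinity_alt
  have h : s1.toList.length ≤ s2.toList.length := hPre
  set l1 := s1.toList with hl1
  set l2 := s2.toList with hl2
  simp only []
  have hstep : (List.range l1.length).foldl
      (fun (acc : Int × Nat × List Int) j =>
        let r := calcA_inner l1 l2 j
        if acc.1 < r.1 then (r.1, j, r.2) else acc) (0, 0, []) =
    (List.range l1.length).foldl
      (fun (acc : Int × Nat × List Int) j =>
        if acc.1 < pvMc l1 l2 j then (pvMc l1 l2 j, j, pvErrL l1 l2 j) else acc) (0, 0, []) :=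
    PySem.List.foldl_congr_mem _ _ _ _ (by intro acc x _; rw [calcA_inner_eq])
  rw [hstep, counts_eq l1 l2 h]
  rcases aOuter_char (pvMc l1 l2) (pvErrL l1 l2) l1.length with ⟨hst, hall⟩ | hch
  · rw [hst]
    have hmx : (PySem.List.max? ((List.range l1.length).map (pvMc l1 l2))
        (fun x => x)).getD 0 = 0 := by
      cases ho : PySem.List.max? ((List.range l1.length).map (pvMc l1 l2)) (fun x => x) with
      | none => rfl
      | some v =>
        have hvmem := PySem.List.max?_mem ho
        rw [List.mem_map] at hvmem
        obtain ⟨i, hi, hfi⟩ := hvmem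
        have h0 : pvMc l1 l2 i = 0 :=
          le_antisymm (hall i (by simpa using hi)) (mc_nonneg l1 l2 i)
        simp [← hfi, h0]
    rw [hmx]
    simp
  · simp only at hch
    obtain ⟨hpos, hlt, hfeq, hgeq, hall, hfirst⟩ := hch
    set st := (List.range l1.length).foldl
      (fun (acc : Int × Nat × List Int) j =>
        if acc.1 < pvMc l1 l2 j then (pvMc l1 l2 j, j, pvErrL l1 l2 j) else acc)
      (0, 0, ([] : List Int)) with hstdef
    have hne : (List.range l1.length).map (pvMc l1 l2) ≠ [] := by
      simp only [ne_eq, List.map_eq_nil_iff, List.range_eq_nil]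
      omega
    obtain ⟨v, hv⟩ : ∃ v, PySem.List.max? ((List.range l1.length).map (pvMc l1 l2))
        (fun x => x) = some v := by
      cases ho : PySem.List.max? ((List.range l1.length).map (pvMc l1 l2)) (fun x => x) with
      | none => exact absurd ((PySem.List.max?_eq_none_iff _ _).mp ho) hne
      | some v => exact ⟨v, rfl⟩
    have hvmem := PySem.List.max?_mem hv
    rw [List.mem_map] at hvmem
    obtain ⟨i, hi, hfi⟩ := hvmem
    have hvle : v ≤ st.1 := hfi ▸ hall i (by simpa using hi)
    have hlev : st.1 ≤ v := by
      have := PySem.List.max?_isMax hv st.1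
        (by rw [← hfeq]; exact List.mem_map_of_mem (by simpa using hlt))
      simpa using this
    have hveq : v = st.1 := le_antisymm hvle hlev
    rw [hv]
    simp only [Option.getD_some]
    rw [hveq]
    rw [if_neg (by omega)]
    have hidx : PySem.List.index? ((List.range l1.length).map (pvMc l1 l2)) st.1
        = some st.2.1 :=
      index?_map_range _ _ _ _ hlt hfeq (fun i hi => ne_of_lt (hfirst i hi))
    rw [hidx]
    simp only [Option.getD_some]
    rw [errs_eq l1 l2 h st.2.1, hgeq]
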